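-- pv_equiv track=rewrite | github.com/2017212073/SC3 | modules/signal_transform.py | get_cut_point
-- ===== SOURCE A (Python) =====
-- def get_cut_point(piece_list):
--     cut_point = []
--     for piece_list_ite in range(len(piece_list)):
--         if piece_list_ite == 0 or piece_list[piece_list_ite][0] != cut_point[-1]:
--             cut_point.append(piece_list[piece_list_ite][0])
--         else:
--             del cut_point[-1]
--         cut_point.append(piece_list[piece_list_ite][-1] + 1)
--     return cut_point
-- ===== SOURCE B (Python) =====
-- def get_cut_point(piece_list):
--     # Build merged [start, end] intervals, then flatten to boundary cut points.
--     merged = []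
--     for p in piece_list:
--         s, e = p[0], p[-1]
--         if merged and s == merged[-1][1] + 1:
--             merged[-1][1] = e
--         else:
--             merged.append([s, e])
--     out = []
--     for iv in merged:
--         out.append(iv[0])
--         out.append(iv[1] + 1)
--     return out
-- ===== Notes on version B (the rewrite author's own statement) =====
-- stated objective: simpler
-- what changed: Replaces A's single-pass append-then-del-backtracking on the flat output list with a two-phase decomposition: first merge exactly-contiguous pieces into an interval list, then flatten each interval to its two boundary points.
import Mathlib
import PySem

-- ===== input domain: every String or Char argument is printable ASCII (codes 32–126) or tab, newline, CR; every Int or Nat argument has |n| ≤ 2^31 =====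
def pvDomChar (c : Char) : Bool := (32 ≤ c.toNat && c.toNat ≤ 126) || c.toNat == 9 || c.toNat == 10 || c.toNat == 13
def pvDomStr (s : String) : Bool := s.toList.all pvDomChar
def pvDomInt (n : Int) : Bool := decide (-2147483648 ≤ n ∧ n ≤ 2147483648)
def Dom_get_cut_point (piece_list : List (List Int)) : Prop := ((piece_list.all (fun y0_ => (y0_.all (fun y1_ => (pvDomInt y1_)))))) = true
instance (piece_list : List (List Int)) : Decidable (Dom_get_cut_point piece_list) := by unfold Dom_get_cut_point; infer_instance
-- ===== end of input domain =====

-- B replaces A's append-then-del backtracking on the flat list with a build-merged-intervals-then-flatten decomposition (objective: simpler).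

-- ===== PORT A =====
-- literal port of A's loop: for i in range(len(piece_list)), mutating cut_point
def get_cut_point (piece_list : List (List Int)) : List Int :=
  (PySem.List.pyRange 0 piece_list.length 1).foldl
    (fun cut_point i =>
      let cut_point :=
        if i == 0 || (PySem.List.pyGetD (PySem.List.pyGetD piece_list i []) 0 0
                        != PySem.List.pyGetD cut_point (-1) 0)
        then cut_point ++ [PySem.List.pyGetD (PySem.List.pyGetD piece_list i []) 0 0]
        else cut_point.dropLast
      cut_point ++ [PySem.List.pyGetD (PySem.List.pyGetD piece_list i []) (-1) 0 + 1])
    []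

-- ===== PORT B =====
-- literal port of Source B: first pass builds the merged interval list, second pass emits boundaries
def get_cut_point_alt (piece_list : List (List Int)) : List Int :=
  let merged := piece_list.foldl
    (fun merged p =>
      let s := PySem.List.pyGetD p 0 0
      let e := PySem.List.pyGetD p (-1) 0
      match merged.getLast? with
      | some iv => if s == iv.2 + 1 then merged.dropLast ++ [(iv.1, e)] else merged ++ [(s, e)]
      | none => merged ++ [(s, e)])
    []
  merged.foldl (fun out iv => out ++ [iv.1, iv.2 + 1]) []

-- ===== PRECONDITION & SPEC =====
-- Pre_ excludes inputs containing an empty piece: there Python A raises IndexError on piece[0].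
def Pre_get_cut_point (piece_list : List (List Int)) : Prop :=
  ∀ p ∈ piece_list, p ≠ []
instance (piece_list : List (List Int)) : Decidable (Pre_get_cut_point piece_list) := by
  unfold Pre_get_cut_point; infer_instance

def pvWitness_get_cut_point : List (List Int) := [[0, 4], [5, 7], [9, 12]]

def Spec_get_cut_point (piece_list : List (List Int)) (out : List Int) : Prop := out = get_cut_point_alt piece_list
instance (piece_list : List (List Int)) (out : List Int) : Decidable (Spec_get_cut_point piece_list out) := by unfold Spec_get_cut_point; infer_instance

-- ===== CLAIM (what is proved, stated in full; the proofs are below) =====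
def Claim_equal_get_cut_point : Prop := ∀ (piece_list : List (List Int)), Dom_get_cut_point piece_list → Pre_get_cut_point piece_list → Spec_get_cut_point piece_list (get_cut_point piece_list)

-- ===== LEMMAS AND PROOFS =====

-- A's loop body on an (index, element) pair (the element replacing piece_list[i])
def pvStepA2 (cut_point : List Int) (i : Int) (p : List Int) : List Int :=
  let cut_point :=
    if i == 0 || (PySem.List.pyGetD p 0 0 != PySem.List.pyGetD cut_point (-1) 0)
    then cut_point ++ [PySem.List.pyGetD p 0 0]
    else cut_point.dropLast
  cut_point ++ [PySem.List.pyGetD p (-1) 0 + 1]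

-- B's first-pass step
def pvStepB (merged : List (Int × Int)) (p : List Int) : List (Int × Int) :=
  let s := PySem.List.pyGetD p 0 0
  let e := PySem.List.pyGetD p (-1) 0
  match merged.getLast? with
  | some iv => if s == iv.2 + 1 then merged.dropLast ++ [(iv.1, e)] else merged ++ [(s, e)]
  | none => merged ++ [(s, e)]

def pvFlat (m : List (Int × Int)) : List Int := m.flatMap (fun iv => [iv.1, iv.2 + 1])

theorem pvFlat_append (m : List (Int × Int)) (iv : Int × Int) :
    pvFlat (m ++ [iv]) = pvFlat m ++ [iv.1, iv.2 + 1] := by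
  simp [pvFlat]

theorem pvFlat_foldl (m : List (Int × Int)) (acc : List Int) :
    m.foldl (fun out iv => out ++ [iv.1, iv.2 + 1]) acc = acc ++ pvFlat m := by
  induction m generalizing acc with
  | nil => simp [pvFlat]
  | cons iv m ih => simp [List.foldl_cons, ih, pvFlat]

theorem pv_bridgeA (piece_list : List (List Int)) :
    get_cut_point piece_list
      = (PySem.List.enumerate piece_list 0).foldl (fun c ip => pvStepA2 c ip.1 ip.2) [] := by
  rw [PySem.List.enumerate_eq_map_pyRange piece_list [], List.foldl_map]
  rfl

theorem pv_bridgeB (piece_list : List (List Int)) :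
    get_cut_point_alt piece_list = pvFlat (piece_list.foldl pvStepB []) := by
  unfold get_cut_point_alt
  rw [pvFlat_foldl]
  rfl

-- loop invariant: from the second iteration on, A's cut_point is pvFlat of B's merged
theorem pv_loop (l : List (List Int)) : ∀ (k : Int) (m : List (Int × Int)),
    m ≠ [] → 1 ≤ k →
    (PySem.List.enumerate l k).foldl (fun c ip => pvStepA2 c ip.1 ip.2) (pvFlat m)
      = pvFlat (l.foldl pvStepB m) := by
  induction l with
  | nil => intro k m hm hk; simp [PySem.List.enumerate_nil]
  | cons p l ih =>
    intro k m hm hk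
    rw [PySem.List.enumerate_cons]
    simp only [List.foldl_cons]
    obtain ⟨m', iv, rfl⟩ : ∃ m' iv, m = m' ++ [iv] :=
      ⟨m.dropLast, m.getLast hm, (List.dropLast_concat_getLast hm).symm⟩
    have hflat : pvFlat (m' ++ [iv]) = (pvFlat m' ++ [iv.1]) ++ [iv.2 + 1] := by
      rw [pvFlat_append]; simp
    have hk0 : (k == 0) = false := by simp; omega
    have hlast : PySem.List.pyGetD (pvFlat (m' ++ [iv])) (-1) 0 = iv.2 + 1 := by
      rw [hflat, PySem.List.pyGetD_neg_one_append_singleton]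
    have hdl : (pvFlat (m' ++ [iv])).dropLast = pvFlat m' ++ [iv.1] := by
      rw [hflat, List.dropLast_concat]
    have hgl : (m' ++ [iv]).getLast? = some iv := by simp
    by_cases hs : PySem.List.pyGetD p 0 0 = iv.2 + 1
    · have hA : pvStepA2 (pvFlat (m' ++ [iv])) k p
          = pvFlat (m' ++ [(iv.1, PySem.List.pyGetD p (-1) 0)]) := by
        simp only [pvStepA2, hk0, hlast, hs, bne_self_eq_false, Bool.or_false,
          hdl]
        rw [pvFlat_append]
        simp [pvFlat]
      have hB : pvStepB (m' ++ [iv]) p = m' ++ [(iv.1, PySem.List.pyGetD p (-1) 0)] := by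
        simp only [pvStepB, hgl, hs, beq_self_eq_true, if_true]
        simp
      rw [hA, hB]
      exact ih (k + 1) _ (by simp) (by omega)
    · have hA : pvStepA2 (pvFlat (m' ++ [iv])) k p
          = pvFlat ((m' ++ [iv]) ++ [(PySem.List.pyGetD p 0 0, PySem.List.pyGetD p (-1) 0)]) := by
        simp only [pvStepA2, hk0, hlast, Bool.false_or]
        rw [if_pos (by simp [hs]), pvFlat_append]
        simp [pvFlat]
      have hB : pvStepB (m' ++ [iv]) p
          = (m' ++ [iv]) ++ [(PySem.List.pyGetD p 0 0, PySem.List.pyGetD p (-1) 0)] := by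
        simp only [pvStepB, hgl]
        rw [if_neg (by simp [hs])]
      rw [hA, hB]
      exact ih (k + 1) _ (by simp) (by omega)

theorem pv_top (piece_list : List (List Int)) :
    get_cut_point piece_list = get_cut_point_alt piece_list := by
  rw [pv_bridgeA, pv_bridgeB]
  cases piece_list with
  | nil => simp [PySem.List.enumerate_nil, pvFlat]
  | cons p l =>
    rw [PySem.List.enumerate_cons]
    simp only [List.foldl_cons]
    have hA : pvStepA2 [] 0 p
        = pvFlat [(PySem.List.pyGetD p 0 0, PySem.List.pyGetD p (-1) 0)] := by
      simp [pvStepA2, pvFlat]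
    have hB : pvStepB [] p = [(PySem.List.pyGetD p 0 0, PySem.List.pyGetD p (-1) 0)] := by
      simp [pvStepB]
    rw [hA, hB]
    exact pv_loop l 1 _ (by simp) le_rfl

-- ===== VERDICT (by name: the statement is the Claim_ definition above) =====
theorem get_cut_point_spec : Claim_equal_get_cut_point := by
  intro pl _ _
  unfold Spec_get_cut_point
  exact pv_top pl
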